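-- pv_equiv track=rewrite | github.com/whalleyph/group_codes | ase-voltage-bk.py | getfu
-- ===== SOURCE A (Python) =====
-- def getfu(atoms):
--     #Determine the formula unit.
--     #print Euclid(vals)
--     try:
--         fu=1
--         vals=atoms.values()
--         for i in range(2,min(vals)+1):
--             fl=1
--             for j in vals:
--                 if j%i!=0:fl=0
--             if fl:fu=i
--         #print fu
--     except: print ("Error in fu determination, fu set to 1");   fu=1
--     return fu
-- ===== SOURCE B (Python) =====
-- def getfu(atoms):
--     # Fold a hand-written Euclidean gcd across the composition counts
--     # instead of trial-dividing every candidate up to min(vals).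
--     vals = list(atoms.values())
--     if not vals:
--         return 1
--     if min(vals) < 2:
--         return 1
--     g = vals[0]
--     for v in vals:
--         while v:
--             g, v = v, g % v
--     return g
-- ===== Notes on version B (the rewrite author's own statement) =====
-- stated objective: alternative
-- what changed: Replaces A's trial division of every candidate 2..min(vals) against all values by a single fold of a hand-written Euclidean gcd over the values (with an explicit empty/min<2 short-circuit matching A's behaviour), dropping only A's error-message print on the empty dict.
import Mathlib
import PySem

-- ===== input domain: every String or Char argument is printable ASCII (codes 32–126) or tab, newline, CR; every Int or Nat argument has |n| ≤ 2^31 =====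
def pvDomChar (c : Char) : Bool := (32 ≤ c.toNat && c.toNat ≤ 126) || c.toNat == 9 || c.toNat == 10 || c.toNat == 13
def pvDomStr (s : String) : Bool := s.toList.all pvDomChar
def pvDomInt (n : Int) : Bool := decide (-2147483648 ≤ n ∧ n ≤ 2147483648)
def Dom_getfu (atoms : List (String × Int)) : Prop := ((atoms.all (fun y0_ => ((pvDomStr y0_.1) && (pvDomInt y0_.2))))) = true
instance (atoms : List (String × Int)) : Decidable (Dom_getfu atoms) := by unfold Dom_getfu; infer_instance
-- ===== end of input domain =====

-- B replaces A's trial division of every candidate 2..min(vals) by a single fold of a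
-- hand-written Euclidean gcd over the values; equivalence is about the RETURN value only
-- (B drops A's error-message print on the empty dict).

-- ===== PORT A =====
-- A: fu=1; for i in range(2, min(vals)+1): fl=1; for j in vals: if j%i!=0: fl=0; if fl: fu=i.
-- min([]) raises ValueError, caught by A's bare except: fu stays 1 (ported as the `none` branch).
def getfu (atoms : List (String × Int)) : Int :=
  let vals := (PySem.Dict.ofList atoms).values
  match PySem.List.min? vals (fun x => x) with
  | none => 1
  | some m =>
    (PySem.List.pyRange 2 (m + 1) 1).foldl
      (fun fu i =>
        let fl := vals.foldl (fun fl j => if PySem.Int.mod j i ≠ 0 then (0 : Int) else fl) 1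
        if fl ≠ 0 then i else fu)
      1

-- ===== PORT B =====
-- needed by pyEuclid's decreasing_by: Python's % strictly shrinks |divisor|
theorem pyMod_natAbs_lt (a b : Int) (h : b ≠ 0) : (PySem.Int.mod a b).natAbs < b.natAbs := by
  rcases lt_or_gt_of_ne h with hb | hb
  · have := PySem.Int.mod_neg_bounds a hb
    omega
  · have h1 := PySem.Int.mod_nonneg a hb
    have h2 := PySem.Int.mod_lt a hb
    omega

-- the inner `while v: g, v = v, g % v` loop of B
def pyEuclid (g v : Int) : Int :=
  if hv : v = 0 then g else pyEuclid v (PySem.Int.mod g v)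
termination_by v.natAbs
decreasing_by exact pyMod_natAbs_lt g v hv

def getfu_alt (atoms : List (String × Int)) : Int :=
  let vals := (PySem.Dict.ofList atoms).values
  match vals with
  | [] => 1
  | v0 :: t =>
    match PySem.List.min? (v0 :: t) (fun x => x) with
    | none => 1
    | some m => if m < 2 then 1 else (v0 :: t).foldl pyEuclid v0

-- ===== PRECONDITION & SPEC =====
def Spec_getfu (atoms : List (String × Int)) (out : Int) : Prop := out = getfu_alt atoms
instance (atoms : List (String × Int)) (out : Int) : Decidable (Spec_getfu atoms out) := by unfold Spec_getfu; infer_instance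

-- ===== CLAIM (what is proved, stated in full; the proofs are below) =====
def Claim_equal_getfu : Prop := ∀ (atoms : List (String × Int)), Dom_getfu atoms → Spec_getfu atoms (getfu atoms)

-- ===== LEMMAS AND PROOFS =====

-- pyEuclid g v is a greatest common divisor of g and v (for nonnegative inputs)
theorem pyEuclid_gcd (v g : Int) (hg : 0 ≤ g) (hv : 0 ≤ v) :
    0 ≤ pyEuclid g v ∧ pyEuclid g v ∣ g ∧ pyEuclid g v ∣ v ∧
      ∀ d : Int, d ∣ g → d ∣ v → d ∣ pyEuclid g v := by
  rw [pyEuclid]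
  split
  · subst ‹v = 0›
    exact ⟨hg, dvd_refl g, dvd_zero g, fun d hd _ => hd⟩
  · rename_i hv0
    have hvpos : 0 < v := lt_of_le_of_ne hv (Ne.symm hv0)
    have hmod : PySem.Int.mod g v = g % v := PySem.Int.mod_eq_emod_of_pos hvpos
    have hmn : 0 ≤ PySem.Int.mod g v := by rw [hmod]; exact Int.emod_nonneg g hv0
    obtain ⟨ih0, ihv, ihm, ihd⟩ := pyEuclid_gcd (PySem.Int.mod g v) v hv hmn
    have hdecomp : g = v * (g / v) + PySem.Int.mod g v := by
      rw [hmod, Int.emod_def]; ring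
    refine ⟨ih0, ?_, ihv, ?_⟩
    · have h1 : pyEuclid v (PySem.Int.mod g v) ∣ v * (g / v) + PySem.Int.mod g v :=
        dvd_add (Dvd.dvd.mul_right ihv _) ihm
      rwa [← hdecomp] at h1
    · intro d hdg hdv
      refine ihd d hdv ?_
      have h2 : PySem.Int.mod g v = g - v * (g / v) := by omega
      rw [h2]; exact dvd_sub hdg (Dvd.dvd.mul_right hdv _)
termination_by v.natAbs
decreasing_by exact pyMod_natAbs_lt g v ‹¬ v = 0›

-- B's fold computes a gcd of the whole list together with the seed
theorem foldl_pyEuclid_gcd (l : List Int) : ∀ (a : Int), 0 ≤ a → (∀ v ∈ l, 0 ≤ v) →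
    0 ≤ l.foldl pyEuclid a ∧ l.foldl pyEuclid a ∣ a ∧ (∀ v ∈ l, l.foldl pyEuclid a ∣ v) ∧
      ∀ d : Int, d ∣ a → (∀ v ∈ l, d ∣ v) → d ∣ l.foldl pyEuclid a := by
  induction l with
  | nil => intro a ha _; exact ⟨ha, dvd_refl a, by simp, fun d hd _ => hd⟩
  | cons v t ih =>
    intro a ha hpos
    have hv : 0 ≤ v := hpos v (List.mem_cons_self ..)
    obtain ⟨e0, eg, ev, ed⟩ := pyEuclid_gcd v a ha hv
    obtain ⟨i0, ia, iv, idd⟩ := ih (pyEuclid a v) e0 (fun w hw => hpos w (List.mem_cons_of_mem _ hw))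
    simp only [List.foldl_cons]
    refine ⟨i0, dvd_trans ia eg, ?_, ?_⟩
    · intro w hw
      rcases List.mem_cons.mp hw with h | h
      · rw [h]; exact dvd_trans ia ev
      · exact iv w h
    · intro d hda hdall
      exact idd d (ed d hda (hdall v (List.mem_cons_self ..))) (fun w hw => hdall w (List.mem_cons_of_mem _ hw))

-- A's inner loop: fl ends 0 iff some value is not divisible by i, else keeps its seed
theorem innerfold_eq (i : Int) (l : List Int) : ∀ (acc : Int),
    l.foldl (fun fl j => if PySem.Int.mod j i ≠ 0 then (0 : Int) else fl) acc =
      if ∀ j ∈ l, i ∣ j then acc else 0 := by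
  induction l with
  | nil => intro acc; simp
  | cons j t ih =>
    intro acc
    simp only [List.foldl_cons, ih]
    by_cases hj : i ∣ j
    · simp [PySem.Int.mod_eq_zero_iff_dvd, hj]
    · have hne : PySem.Int.mod j i ≠ 0 := by
        rw [Ne, PySem.Int.mod_eq_zero_iff_dvd]; exact hj
      have hnall : ¬ ∀ x ∈ j :: t, i ∣ x := by
        intro h; exact absurd (h j (List.mem_cons_self ..)) hj
      simp [hne]
      intro h1 _
      exact absurd h1 hj

-- A's per-candidate step, with the inner flag loop reduced to its meaning
theorem sel_step (c : Prop) [Decidable c] (i fu : Int) :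
    (if (if c then (1 : Int) else 0) ≠ 0 then i else fu) = if c then i else fu := by
  split_ifs <;> simp_all

-- when no candidate in the list divides everything, A's fold keeps its seed
theorem foldA_no_hit (vals : List Int) (l : List Int) : ∀ (init : Int),
    (∀ i ∈ l, ¬ ∀ j ∈ vals, i ∣ j) →
    l.foldl (fun fu i => if ∀ j ∈ vals, i ∣ j then i else fu) init = init := by
  induction l with
  | nil => intro init _; rfl
  | cons i t ih =>
    intro init h
    simp only [List.foldl_cons, if_neg (h i (List.mem_cons_self ..))]
    exact ih init (fun x hx => h x (List.mem_cons_of_mem _ hx))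

-- once r (the gcd) is reached, larger candidates never fire, so A's fold returns r
theorem foldA_hit (vals : List Int) (r : Int) (hr2 : 2 ≤ r)
    (hPr : ∀ j ∈ vals, r ∣ j) (hmax : ∀ i : Int, (∀ j ∈ vals, i ∣ j) → i ∣ r) :
    ∀ b : Int, r + 1 ≤ b →
      (PySem.List.pyRange 2 b 1).foldl
        (fun fu i => if ∀ j ∈ vals, i ∣ j then i else fu) 1 = r := by
  intro b hb
  induction b, hb using Int.le_induction with
  | base =>
    rw [PySem.List.pyRange_one_succ_right (by omega), List.foldl_append]
    simp only [List.foldl_cons, List.foldl_nil, if_pos hPr]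
  | succ b hb ih =>
    have hnb : ¬ ∀ j ∈ vals, b ∣ j := by
      intro hball
      have : b ≤ r := Int.le_of_dvd (by omega) (hmax b hball)
      omega
    rw [PySem.List.pyRange_one_succ_right (by omega), List.foldl_append, ih]
    simp only [List.foldl_cons, List.foldl_nil, if_neg hnb]

-- the common core: both match-bodies agree for every list of values
theorem core_eq (vals : List Int) :
    (match PySem.List.min? vals (fun x => x) with
      | none => (1 : Int)
      | some m =>
        (PySem.List.pyRange 2 (m + 1) 1).foldl
          (fun fu i =>
            let fl := vals.foldl (fun fl j => if PySem.Int.mod j i ≠ 0 then (0 : Int) else fl) 1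
            if fl ≠ 0 then i else fu) 1) =
    (match vals with
      | [] => (1 : Int)
      | v0 :: t =>
        match PySem.List.min? (v0 :: t) (fun x => x) with
        | none => 1
        | some m => if m < 2 then 1 else (v0 :: t).foldl pyEuclid v0) := by
  cases vals with
  | nil =>
    rw [show PySem.List.min? ([] : List Int) (fun x => x) = none from
      (PySem.List.min?_eq_none_iff _ _).mpr rfl]
  | cons v0 t =>
    show _ = (match PySem.List.min? (v0 :: t) (fun x => x) with
      | none => (1 : Int)
      | some m => if m < 2 then 1 else (v0 :: t).foldl pyEuclid v0)
    cases hm : PySem.List.min? (v0 :: t) (fun x => x) with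
    | none => exact absurd ((PySem.List.min?_eq_none_iff _ _).mp hm) (by simp)
    | some m =>
      simp only
      have hmem : m ∈ v0 :: t := PySem.List.min?_mem hm
      have hmin : ∀ y ∈ v0 :: t, m ≤ y := PySem.List.min?_isMin hm
      simp only [innerfold_eq, sel_step]
      by_cases hm2 : m < 2
      · rw [if_pos hm2, PySem.List.pyRange_one_eq_nil (by omega)]
        rfl
      · rw [if_neg hm2]
        rw [not_lt] at hm2
        have hpos : ∀ v ∈ v0 :: t, 0 ≤ v := fun v hvv => le_trans (by omega) (hmin v hvv)
        obtain ⟨r0, ra, rall, rmax⟩ :=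
          foldl_pyEuclid_gcd (v0 :: t) v0 (hpos v0 (List.mem_cons_self ..)) hpos
        set r := (v0 :: t).foldl pyEuclid v0 with hrdef
        have hv0 : 2 ≤ v0 := le_trans hm2 (hmin v0 (List.mem_cons_self ..))
        have hrne : r ≠ 0 := by
          intro h0
          have hd := rall v0 (List.mem_cons_self ..)
          rw [h0] at hd
          have : v0 = 0 := zero_dvd_iff.mp hd
          omega
        have hrpos : 0 < r := lt_of_le_of_ne r0 (Ne.symm hrne)
        by_cases hr2 : 2 ≤ r
        · have hrm : r ≤ m := Int.le_of_dvd (by omega) (rall m hmem)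
          exact foldA_hit (v0 :: t) r hr2 rall
            (fun i hi => rmax i (hi v0 (List.mem_cons_self ..)) hi) (m + 1) (by omega)
        · have hr1 : r = 1 := by omega
          rw [foldA_no_hit, hr1]
          intro i hi hall
          have hir : i ∣ r := rmax i (hall v0 (List.mem_cons_self ..)) hall
          have h1 : i ≤ r := Int.le_of_dvd hrpos hir
          have h2 : 2 ≤ i := ((PySem.List.mem_pyRange_one).mp hi).1
          omega

-- ===== VERDICT (by name: the statement is the Claim_ definition above) =====
theorem getfu_spec : Claim_equal_getfu := by
  intro atoms _
  unfold Spec_getfu getfu getfu_alt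
  exact core_eq ((PySem.Dict.ofList atoms).values)
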